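-- pv_equiv track=rewrite | github.com/tariq-hasan/leetcode | coding_patterns/10-modified-binary-search/03-array-manipulation-with-binary-search/medium_436_find_right_interval.py | findRightInterval_brute_force
-- ===== SOURCE A (Python) =====
-- def findRightInterval_brute_force(intervals):
--     """
--     Approach 3: Brute Force (For comparison)
--
--     Time Complexity: O(n²)
--     Space Complexity: O(1)
--
--     Strategy: For each interval, check all other intervals
--     Good for: Understanding the problem, small inputs
--     """
--     n = len(intervals)
--     result = [-1] * n
--
--     for i in range(n):
--         end_i = intervals[i][1]
--         min_start = float('inf')
--         right_idx = -1
--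
--         # Check all intervals to find the one with smallest start >= end_i
--         for j in range(n):
--             start_j = intervals[j][0]
--             if start_j >= end_i and start_j < min_start:
--                 min_start = start_j
--                 right_idx = j
--
--         result[i] = right_idx
--
--     return result
-- ===== SOURCE B (Python) =====
-- def _bisect_left(a, x):
--     # standard bisect_left (A imports nothing, so written out by hand)
--     lo, hi = 0, len(a)
--     while lo < hi:
--         mid = (lo + hi) // 2
--         if a[mid] < x:
--             lo = mid + 1
--         else:
--             hi = mid
--     return lo
--
--
-- def findRightInterval_brute_force(intervals):
--     """Sort (start, index) pairs once, then binary-search each end: O(n log n)."""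
--     pairs = sorted((iv[0], i) for i, iv in enumerate(intervals))
--     starts = [p[0] for p in pairs]
--     n = len(pairs)
--
--     def lookup(end):
--         p = _bisect_left(starts, end)
--         return pairs[p][1] if p < n else -1
--
--     return [lookup(iv[1]) for iv in intervals]
-- ===== Notes on version B (the rewrite author's own statement) =====
-- stated objective: faster
-- what changed: Replaces the quadratic per-interval linear minimum scan by sorting (start, index) pairs once and answering each end with a binary search (bisect_left) into the sorted starts.
import Mathlib
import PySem

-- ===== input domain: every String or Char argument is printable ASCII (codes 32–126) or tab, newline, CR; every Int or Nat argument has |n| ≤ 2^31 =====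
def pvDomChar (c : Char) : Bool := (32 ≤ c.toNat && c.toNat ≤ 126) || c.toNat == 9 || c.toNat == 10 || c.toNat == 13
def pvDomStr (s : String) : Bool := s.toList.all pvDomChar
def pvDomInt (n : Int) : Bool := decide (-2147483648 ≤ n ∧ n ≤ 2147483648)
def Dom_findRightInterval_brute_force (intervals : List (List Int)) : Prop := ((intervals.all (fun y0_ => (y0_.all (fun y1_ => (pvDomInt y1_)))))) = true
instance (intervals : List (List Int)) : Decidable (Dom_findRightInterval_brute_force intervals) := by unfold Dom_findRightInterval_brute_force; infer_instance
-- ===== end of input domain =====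

-- B sorts (start, index) pairs once and binary-searches each end instead of A's per-interval linear scan.


-- ===== PORT A =====
-- Literal port of the brute force: result = [-1]*n, then for each i a full scan over j
-- maintaining (min_start, right_idx); Python's float('inf') initial min_start is the
-- `none` of an `Option Int` (inf compares greater than every int, `none` plays that role).
def findRightInterval_brute_force (intervals : List (List Int)) : List Int :=
  let n : Int := intervals.length
  let result : List Int := List.replicate intervals.length (-1)
  (PySem.List.pyRange 0 n 1).foldl (fun result i =>
    let end_i := PySem.List.pyGetD (PySem.List.pyGetD intervals i []) 1 0
    let st := (PySem.List.pyRange 0 n 1).foldl (fun (st : Option Int × Int) j =>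
      let start_j := PySem.List.pyGetD (PySem.List.pyGetD intervals j []) 0 0
      match st.1 with
      | none => if start_j ≥ end_i then (some start_j, j) else st
      | some min_start =>
          if start_j ≥ end_i ∧ start_j < min_start then (some start_j, j) else st)
      (none, -1)
    PySem.List.pySetD result i st.2) result

-- ===== PORT B =====
-- Port of Source B: pairs = sorted((iv[0], i) for i, iv in enumerate(intervals)) (Python's
-- tuple sort = PySem.List.sorted2 by fst then snd); Source B's hand-written _bisect_left is
-- exactly the lo/hi halving loop of PySem.List.bisectLeft, used here by that name.
def findRightInterval_brute_force_alt (intervals : List (List Int)) : List Int :=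
  let pairs := PySem.List.sorted2
    ((PySem.List.enumerate intervals).map (fun p => (PySem.List.pyGetD p.2 0 0, p.1)))
    (fun q => q.1) (fun q => q.2) false
  let starts := pairs.map (fun q => q.1)
  let n := pairs.length
  intervals.map (fun iv =>
    let p := PySem.List.bisectLeft starts (PySem.List.pyGetD iv 1 0)
    if p < n then (PySem.List.pyGetD pairs (p : Int) (0, 0)).2 else -1)

-- ===== PRECONDITION & SPEC =====
-- Python A evaluates intervals[i][1] and intervals[j][0]; a sublist of length < 2 makes it
-- raise IndexError, so exactly those inputs are excluded.
def Pre_findRightInterval_brute_force (intervals : List (List Int)) : Prop :=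
  ∀ l ∈ intervals, 2 ≤ l.length
instance (intervals : List (List Int)) : Decidable (Pre_findRightInterval_brute_force intervals) := by
  unfold Pre_findRightInterval_brute_force; infer_instance
def pvWitness_findRightInterval_brute_force : List (List Int) := [[1, 2], [2, 3], [0, 1]]

def Spec_findRightInterval_brute_force (intervals : List (List Int)) (out : List Int) : Prop := out = findRightInterval_brute_force_alt intervals
instance (intervals : List (List Int)) (out : List Int) : Decidable (Spec_findRightInterval_brute_force intervals out) := by unfold Spec_findRightInterval_brute_force; infer_instance

-- ===== CLAIM (what is proved, stated in full; the proofs are below) =====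
def Claim_equal_findRightInterval_brute_force : Prop := ∀ (intervals : List (List Int)), Dom_findRightInterval_brute_force intervals → Pre_findRightInterval_brute_force intervals → Spec_findRightInterval_brute_force intervals (findRightInterval_brute_force intervals)

-- ===== LEMMAS AND PROOFS =====

-- helpers (proof-only)
def lexLe (a b : Int × Int) : Prop := a.1 < b.1 ∨ (a.1 = b.1 ∧ a.2 ≤ b.2)

def ltB (a b : Int × Int) : Bool := decide (a.1 < b.1) || (!decide (b.1 < a.1) && decide (a.2 < b.2))

lemma ltB_false_iff (a b : Int × Int) : ltB b a = false ↔ lexLe a b := by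
  simp [ltB, lexLe]; omega

lemma insertBy_ltB_pairwise (x : Int × Int) :
    ∀ ys : List (Int × Int), ys.Pairwise (fun a b => ltB b a = false) →
      (PySem.List.insertBy ltB x ys).Pairwise (fun a b => ltB b a = false) := by
  intro ys
  induction ys with
  | nil => intro _; simp [PySem.List.insertBy]
  | cons y t ih =>
    intro h
    rw [List.pairwise_cons] at h
    by_cases hxy : ltB x y = true
    · rw [show PySem.List.insertBy ltB x (y :: t) = x :: y :: t by simp [PySem.List.insertBy, hxy]]
      refine List.Pairwise.cons ?_ (List.Pairwise.cons h.1 h.2)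
      intro z hz
      rcases List.mem_cons.mp hz with rfl | hz
      · simp only [ltB] at hxy ⊢; revert hxy; simp; omega
      · have := h.1 z hz
        simp only [ltB] at hxy this ⊢; revert hxy this; simp; omega
    · rw [show PySem.List.insertBy ltB x (y :: t) = y :: PySem.List.insertBy ltB x t by
        simp [PySem.List.insertBy, hxy]]
      refine List.Pairwise.cons ?_ (ih h.2)
      intro z hz
      rw [PySem.List.insertBy_mem_iff] at hz
      rcases hz with rfl | hz
      · simpa using hxy
      · exact h.1 z hz

lemma foldl_insertBy_ltB_pairwise :
    ∀ (xs acc : List (Int × Int)), acc.Pairwise (fun a b => ltB b a = false) →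
      (xs.foldl (fun acc x => PySem.List.insertBy ltB x acc) acc).Pairwise (fun a b => ltB b a = false) := by
  intro xs
  induction xs with
  | nil => intro acc h; simpa using h
  | cons x t ih => intro acc h; exact ih _ (insertBy_ltB_pairwise x acc h)

lemma sorted2_eq_foldl (L : List (Int × Int)) :
    PySem.List.sorted2 L (fun q => q.1) (fun q => q.2) false
      = L.foldl (fun acc x => PySem.List.insertBy ltB x acc) [] := rfl

lemma sorted2_pairwise_lexLe (L : List (Int × Int)) :
    (PySem.List.sorted2 L (fun q => q.1) (fun q => q.2) false).Pairwise lexLe := by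
  rw [sorted2_eq_foldl]
  have := foldl_insertBy_ltB_pairwise L [] (by simp)
  exact this.imp (fun h => (ltB_false_iff _ _).mp h)

-- A's inner scan as a recursive "first minimum" over (start, index) pairs
def firstMin (e : Int) : List (Int × Int) → Option (Int × Int)
  | [] => none
  | q :: t =>
      if e ≤ q.1 then
        some (match firstMin e t with
              | none => q
              | some r => if r.1 < q.1 then r else q)
      else firstMin e t

def stepA (e : Int) (st : Option Int × Int) (q : Int × Int) : Option Int × Int :=
  match st.1 with
  | none => if q.1 ≥ e then (some q.1, q.2) else st
  | some m => if q.1 ≥ e ∧ q.1 < m then (some q.1, q.2) else st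

def comb (st : Option Int × Int) : Option (Int × Int) → Option Int × Int
  | none => st
  | some r =>
      match st.1 with
      | none => (some r.1, r.2)
      | some v => if r.1 < v then (some r.1, r.2) else st

lemma foldl_stepA_eq (e : Int) :
    ∀ (L : List (Int × Int)) (st : Option Int × Int),
      L.foldl (stepA e) st = comb st (firstMin e L) := by
  intro L
  induction L with
  | nil => intro st; simp [comb, firstMin]
  | cons q t ih =>
    intro st
    rw [List.foldl_cons, ih]
    obtain ⟨o, i⟩ := st
    by_cases he : e ≤ q.1
    · cases o with
      | none =>
        simp only [stepA, firstMin, he, if_pos]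
        cases hft : firstMin e t with
        | none => simp [comb]
        | some r =>
          by_cases hrq : r.1 < q.1 <;> simp [comb, hrq]
      | some v =>
        simp only [stepA, firstMin, he, if_pos]
        cases hft : firstMin e t with
        | none =>
          by_cases hqv : q.1 < v <;> simp [comb, hqv]
        | some r =>
          by_cases hrq : r.1 < q.1 <;> by_cases hqv : q.1 < v <;>
            simp [comb, hrq, hqv] <;> omega
    · cases o with
      | none => simp [stepA, firstMin, he, comb]
      | some v => simp [stepA, firstMin, he, comb]

lemma firstMin_eq_none_iff (e : Int) (L : List (Int × Int)) :
    firstMin e L = none ↔ ∀ q ∈ L, ¬ e ≤ q.1 := by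
  induction L with
  | nil => simp [firstMin]
  | cons q t ih =>
    by_cases he : e ≤ q.1
    · simp [firstMin, he]
    · simp only [firstMin, he, if_false, ih]
      constructor
      · intro h p hp
        rcases List.mem_cons.mp hp with rfl | hp
        · exact he
        · exact h p hp
      · intro h p hp; exact h p (List.mem_cons_of_mem _ hp)

lemma firstMin_spec (e : Int) :
    ∀ (L : List (Int × Int)), L.Pairwise (fun a b => a.2 < b.2) →
      ∀ r, firstMin e L = some r →
        r ∈ L ∧ e ≤ r.1 ∧ ∀ q ∈ L, e ≤ q.1 → lexLe r q := by
  intro L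
  induction L with
  | nil => intro _ r h; simp [firstMin] at h
  | cons q t ih =>
    intro hp r hr
    rw [List.pairwise_cons] at hp
    by_cases he : e ≤ q.1
    · simp only [firstMin, he, if_pos] at hr
      cases hft : firstMin e t with
      | none =>
        rw [hft] at hr
        simp only [Option.some.injEq] at hr
        subst hr
        refine ⟨List.mem_cons_self .., he, ?_⟩
        intro p hp' hep
        rcases List.mem_cons.mp hp' with rfl | hp'
        · exact Or.inr ⟨rfl, le_refl _⟩
        · exact absurd hep ((firstMin_eq_none_iff e t).mp hft p hp')
      | some s =>
        rw [hft] at hr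
        obtain ⟨hs1, hs2, hs3⟩ := ih hp.2 s hft
        by_cases hsq : s.1 < q.1
        · simp only [hsq, if_pos, Option.some.injEq] at hr
          subst hr
          refine ⟨List.mem_cons_of_mem _ hs1, hs2, ?_⟩
          intro p hp' hep
          rcases List.mem_cons.mp hp' with rfl | hp'
          · exact Or.inl hsq
          · exact hs3 p hp' hep
        · simp only [hsq, if_false, Option.some.injEq] at hr
          subst hr
          refine ⟨List.mem_cons_self .., he, ?_⟩
          intro p hp' hep
          rcases List.mem_cons.mp hp' with rfl | hp'
          · exact Or.inr ⟨rfl, le_refl _⟩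
          · have := hs3 p hp' hep
            have hqp : q.2 < p.2 := hp.1 p hp'
            unfold lexLe at this ⊢
            omega
    · simp only [firstMin, he, if_false] at hr
      obtain ⟨h1, h2, h3⟩ := ih hp.2 r hr
      refine ⟨List.mem_cons_of_mem _ h1, h2, ?_⟩
      intro p hp' hep
      rcases List.mem_cons.mp hp' with rfl | hp'
      · exact absurd hep he
      · exact h3 p hp' hep

lemma setFold (f : Int → Int) :
    ∀ (n : Nat) (res : List Int), n ≤ res.length →
      (PySem.List.pyRange 0 (n : Int) 1).foldl (fun r i => PySem.List.pySetD r i (f i)) res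
        = ((List.range n).map (fun k : Nat => f (k : Int))) ++ res.drop n := by
  intro n
  induction n with
  | zero => intro res _; simp [PySem.List.pyRange_one_eq_nil]
  | succ m ih =>
    intro res hlen
    have hcast : ((m + 1 : Nat) : Int) = (m : Int) + 1 := by push_cast; ring
    rw [hcast, PySem.List.pyRange_one_succ_right (by positivity), List.foldl_append]
    rw [ih res (by omega)]
    have hm : m < res.length := by omega
    simp only [List.foldl_cons, List.foldl_nil]
    rw [PySem.List.pySetD_natCast]
    rw [List.drop_eq_getElem_cons hm]
    rw [List.set_append_right _ _ (by simp)]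
    simp only [List.length_map, List.length_range, Nat.sub_self]
    rw [List.set_cons_zero]
    simp [List.range_succ]

def Epairs (intervals : List (List Int)) : List (Int × Int) :=
  (PySem.List.enumerate intervals).map (fun p => (PySem.List.pyGetD p.2 0 0, p.1))

lemma Epairs_eq_map_pyRange (intervals : List (List Int)) :
    Epairs intervals = (PySem.List.pyRange 0 (intervals.length : Int) 1).map
      (fun j => (PySem.List.pyGetD (PySem.List.pyGetD intervals j []) 0 0, j)) := by
  unfold Epairs
  rw [PySem.List.enumerate_eq_map_pyRange intervals [], List.map_map]
  rfl

lemma Epairs_snd_increasing (intervals : List (List Int)) :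
    (Epairs intervals).Pairwise (fun a b => a.2 < b.2) := by
  unfold Epairs
  exact (PySem.List.pairwise_lt_enumerate intervals 0).map _ (fun a b h => h)

lemma inner_eq (intervals : List (List Int)) (e : Int) :
    (comb (none, -1) (firstMin e (Epairs intervals))).2
      = (let pairs := PySem.List.sorted2 (Epairs intervals) (fun q => q.1) (fun q => q.2) false
         let starts := pairs.map (fun q => q.1)
         let p := PySem.List.bisectLeft starts e
         if p < pairs.length then (PySem.List.pyGetD pairs (p : Int) (0, 0)).2 else -1) := by
  simp only []
  set P := PySem.List.sorted2 (Epairs intervals) (fun q => q.1) (fun q => q.2) false with hPdef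
  have hperm : P.Perm (Epairs intervals) := PySem.List.sorted2_perm _ _ _ _
  have hpw : P.Pairwise lexLe := sorted2_pairwise_lexLe _
  have hstarts : (P.map (fun q => q.1)).Pairwise (fun a b => a ≤ b) :=
    hpw.map _ (fun a b h => by unfold lexLe at h; omega)
  obtain ⟨hple, hlt, hge⟩ := PySem.List.bisectLeft_spec (P.map (fun q => q.1)) e hstarts
  set p := PySem.List.bisectLeft (P.map (fun q => q.1)) e with hpdef
  simp only [List.length_map] at hple hlt hge
  by_cases hp : p < P.length
  · -- B returns P[p].2; A's first-min is P[p]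
    have hBP : (PySem.List.pyGetD P (p : Int) ((0 : Int), (0 : Int))).2 = (P[p]).2 := by
      rw [PySem.List.pyGetD_natCast, List.getD_eq_getElem _ _ hp]
    have hePp : e ≤ (P[p]).1 := by
      have := hge p (by simpa using hp) (le_refl p)
      simpa using this
    cases hfm : firstMin e (Epairs intervals) with
    | none =>
      exfalso
      have := (firstMin_eq_none_iff e _).mp hfm (P[p]) (hperm.subset (List.getElem_mem hp))
      exact this hePp
    | some r =>
      obtain ⟨hrmem, hre, hrmin⟩ := firstMin_spec e _ (Epairs_snd_increasing intervals) r hfm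
      obtain ⟨j, hj, hjr⟩ := List.mem_iff_getElem.mp (hperm.mem_iff.mpr hrmem)
      have hjp : p ≤ j := by
        by_contra hcon
        have := hlt j (by simpa using hj) (by omega)
        simp only [List.getElem_map] at this
        rw [hjr] at this
        omega
      have h1 : lexLe (P[p]) r := by
        rcases Nat.lt_or_ge p j with hlt' | hge'
        · have := List.pairwise_iff_getElem.mp hpw p j hp hj hlt'
          rwa [hjr] at this
        · have : p = j := by omega
          subst this
          rw [hjr.symm] at *
          exact Or.inr ⟨rfl, le_refl _⟩
      have h2 : lexLe r (P[p]) :=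
        hrmin (P[p]) (hperm.subset (List.getElem_mem hp)) hePp
      have hr2 : r.2 = (P[p]).2 := by unfold lexLe at h1 h2; omega
      rw [hBP]
      simp [comb, hp, hr2]
  · -- no interval starts at or after e
    have hcase : ∀ q ∈ Epairs intervals, ¬ e ≤ q.1 := by
      intro q hq
      obtain ⟨j, hj, hjq⟩ := List.mem_iff_getElem.mp (hperm.mem_iff.mpr hq)
      have := hlt j (by simpa using hj) (by omega)
      simp only [List.getElem_map] at this
      rw [hjq] at this
      omega
    rw [(firstMin_eq_none_iff e _).mpr hcase]
    simp [comb, hp]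

lemma findRightInterval_brute_force_eq_map (intervals : List (List Int)) :
    findRightInterval_brute_force intervals = (List.range intervals.length).map (fun (k : Nat) =>
      (comb (none, -1) (firstMin (PySem.List.pyGetD (PySem.List.pyGetD intervals (k : Int) []) 1 0)
        (Epairs intervals))).2) := by
  unfold findRightInterval_brute_force
  simp only []
  rw [setFold (fun i =>
      ((PySem.List.pyRange 0 (intervals.length : Int) 1).foldl (fun (st : Option Int × Int) j =>
        let start_j := PySem.List.pyGetD (PySem.List.pyGetD intervals j []) 0 0
        match st.1 with
        | none => if start_j ≥ PySem.List.pyGetD (PySem.List.pyGetD intervals i []) 1 0 then (some start_j, j) else st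
        | some min_start =>
            if start_j ≥ PySem.List.pyGetD (PySem.List.pyGetD intervals i []) 1 0 ∧ start_j < min_start then (some start_j, j) else st)
        (none, -1)).2)
    intervals.length (List.replicate intervals.length (-1)) (by simp)]
  simp only [List.drop_replicate, Nat.sub_self, List.replicate_zero, List.append_nil]
  apply List.map_congr_left
  intro k hk
  set e := PySem.List.pyGetD (PySem.List.pyGetD intervals (k : Int) []) 1 0 with hedef
  have hfold : (PySem.List.pyRange 0 (intervals.length : Int) 1).foldl (fun (st : Option Int × Int) j =>
        let start_j := PySem.List.pyGetD (PySem.List.pyGetD intervals j []) 0 0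
        match st.1 with
        | none => if start_j ≥ e then (some start_j, j) else st
        | some min_start =>
            if start_j ≥ e ∧ start_j < min_start then (some start_j, j) else st)
        (none, -1)
      = (Epairs intervals).foldl (stepA e) (none, -1) := by
    rw [Epairs_eq_map_pyRange, List.foldl_map]
    apply List.foldl_ext
    intro st j _
    obtain ⟨o, i⟩ := st
    cases o <;> rfl
  rw [hfold, foldl_stepA_eq]

theorem main_eq_findRightInterval (intervals : List (List Int)) :
    findRightInterval_brute_force intervals = findRightInterval_brute_force_alt intervals := by
  rw [findRightInterval_brute_force_eq_map]
  unfold findRightInterval_brute_force_alt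
  simp only []
  apply List.ext_getElem
  · simp
  · intro k h1 h2
    have hk : k < intervals.length := by simpa using h1
    simp only [List.getElem_map, List.getElem_range]
    have hgk : PySem.List.pyGetD intervals (k : Int) [] = intervals[k] := by
      rw [PySem.List.pyGetD_natCast, List.getD_eq_getElem _ _ hk]
    rw [hgk, inner_eq intervals (PySem.List.pyGetD intervals[k] 1 0)]
    rfl

-- ===== VERDICT (by name: the statement is the Claim_ definition above) =====
theorem findRightInterval_brute_force_spec : Claim_equal_findRightInterval_brute_force := by
  intro intervals _ _
  unfold Spec_findRightInterval_brute_force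
  exact main_eq_findRightInterval intervals
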